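-- pv_equiv track=rewrite | github.com/Mikecranesync/Agent-Factory | phoenix_integration/scripts/export_golden_dataset.py | extract_safety_warnings
-- ===== SOURCE A (Python) =====
-- def extract_safety_warnings(content: str) -> list[str]:
--     """
--     Extract safety warnings from content.
--     Simple heuristic - adapt to your data.
--     """
--     warnings = []
--     content_lower = content.lower()
--
--     # Common safety keywords
--     safety_keywords = [
--         "lockout", "tagout", "loto",
--         "voltage", "energized", "zero energy",
--         "ppe", "gloves", "safety glasses",
--         "rotating", "pinch point", "crush",
--         "hot surface", "burn",
--         "arc flash", "electrical hazard"
--     ]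
--
--     sentences = content.split(".")
--     for sentence in sentences:
--         sentence_lower = sentence.lower()
--         for keyword in safety_keywords:
--             if keyword in sentence_lower:
--                 warnings.append(sentence.strip())
--                 break
--
--     # Deduplicate while preserving order
--     seen = set()
--     unique_warnings = []
--     for w in warnings:
--         if w not in seen and len(w) > 10:
--             seen.add(w)
--             unique_warnings.append(w)
--
--     return unique_warnings[:5]  # Max 5 warnings
-- ===== SOURCE B (Python) =====
-- SAFETY_KEYWORDS = [
--     "lockout", "tagout", "loto",
--     "voltage", "energized", "zero energy",
--     "ppe", "gloves", "safety glasses",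
--     "rotating", "pinch point", "crush",
--     "hot surface", "burn",
--     "arc flash", "electrical hazard"
-- ]
--
--
-- def extract_safety_warnings(content: str) -> list[str]:
--     """Keyword-major inverted search: for each keyword collect the set of
--     sentence indices it occurs in, then a single ordered pass over the hit
--     indices strips, length-filters, dedups and stops at 5."""
--     sentences = content.split(".")
--     lows = [s.lower() for s in sentences]
--     hit = set()
--     for k in SAFETY_KEYWORDS:
--         for i, low in enumerate(lows):
--             if k in low:
--                 hit.add(i)
--     seen = set()
--     out = []
--     for i, sentence in enumerate(sentences):
--         if i in hit:
--             t = sentence.strip()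
--             if len(t) > 10 and t not in seen:
--                 seen.add(t)
--                 out.append(t)
--                 if len(out) == 5:
--                     break
--     return out
-- ===== Notes on version B (the rewrite author's own statement) =====
-- stated objective: alternative
-- what changed: Inverts the loop nesting: B searches keyword-major, building a set of hit sentence indices (one inner scan per keyword over pre-lowered sentences), then a single ordered index pass does strip/length-filter/dedup and stops at 5, instead of A's sentence-major scan with break followed by a separate dedup loop and a [:5] slice.
import Mathlib
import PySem

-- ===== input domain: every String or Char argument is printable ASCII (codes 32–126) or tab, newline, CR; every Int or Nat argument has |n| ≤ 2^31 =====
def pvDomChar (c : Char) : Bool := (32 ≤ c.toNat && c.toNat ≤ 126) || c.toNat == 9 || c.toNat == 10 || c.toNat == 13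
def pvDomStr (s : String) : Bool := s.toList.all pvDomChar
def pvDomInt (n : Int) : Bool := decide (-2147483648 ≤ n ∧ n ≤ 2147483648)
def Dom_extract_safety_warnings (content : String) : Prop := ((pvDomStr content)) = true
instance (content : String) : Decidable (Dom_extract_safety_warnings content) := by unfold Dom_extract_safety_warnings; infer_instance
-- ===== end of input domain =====

-- B inverts the loop nesting: keyword-major search into an index set, then one
-- ordered index pass that strips, length-filters, dedups and stops at 5
-- (objective: alternative — same cost, different traversal).

-- shared by both Pythons: the same keyword list literal
def pvKeywords : List String :=
  ["lockout", "tagout", "loto",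
   "voltage", "energized", "zero energy",
   "ppe", "gloves", "safety glasses",
   "rotating", "pinch point", "crush",
   "hot surface", "burn",
   "arc flash", "electrical hazard"]

-- ===== PORT A =====
-- A's inner "for keyword … if keyword in sentence_lower: append; break"
def pvMatches (sentence : String) : Bool :=
  pvKeywords.any (fun k => PySem.Str.isIn k (PySem.Str.lower sentence))

def extract_safety_warnings (content : String) : List String :=
  let warnings := ((PySem.Str.split? content ".").getD []).foldl
    (fun acc sentence =>
      if pvMatches sentence then acc ++ [PySem.Str.strip sentence] else acc) []
  let dedup := warnings.foldl
    (fun (st : PySem.Set String × List String) w =>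
      if !(PySem.Set.contains st.1 w) && decide (10 < PySem.Str.len w) then
        (PySem.Set.add st.1 w, st.2 ++ [w])
      else st)
    (PySem.Set.empty, [])
  PySem.List.slice dedup.2 none (some 5)

-- ===== PORT B =====
-- B's keyword-major nested loops: hit = set of sentence indices any keyword occurs in
def pvHit (lows : List String) : PySem.Set Int :=
  pvKeywords.foldl
    (fun acc k =>
      (PySem.List.enumerate lows 0).foldl
        (fun acc p => if PySem.Str.isIn k p.2 then PySem.Set.add acc p.1 else acc) acc)
    PySem.Set.empty

-- B's final "for i, sentence in enumerate(sentences)" pass with break at 5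
def pvGo (hit : PySem.Set Int) (seen : PySem.Set String) (out : List String) :
    List (Int × String) → List String
  | [] => out
  | (i, sentence) :: rest =>
    if PySem.Set.contains hit i then
      let t := PySem.Str.strip sentence
      if decide (10 < PySem.Str.len t) && !(PySem.Set.contains seen t) then
        let out' := out ++ [t]
        if out'.length == 5 then out' else pvGo hit (PySem.Set.add seen t) out' rest
      else pvGo hit seen out rest
    else pvGo hit seen out rest

def extract_safety_warnings_alt (content : String) : List String :=
  let sentences := (PySem.Str.split? content ".").getD []
  let lows := sentences.map PySem.Str.lower
  pvGo (pvHit lows) PySem.Set.empty [] (PySem.List.enumerate sentences 0)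

-- ===== PRECONDITION & SPEC =====
def Spec_extract_safety_warnings (content : String) (out : List String) : Prop := out = extract_safety_warnings_alt content
instance (content : String) (out : List String) : Decidable (Spec_extract_safety_warnings content out) := by unfold Spec_extract_safety_warnings; infer_instance

-- ===== CLAIM (what is proved, stated in full; the proofs are below) =====
def Claim_equal_extract_safety_warnings : Prop := ∀ (content : String), Dom_extract_safety_warnings content → Spec_extract_safety_warnings content (extract_safety_warnings content)

-- ===== LEMMAS AND PROOFS =====

-- the stripped, keyword-matching sentences, in order
def pvMapped (l : List String) : List String :=
  (l.filter pvMatches).map PySem.Str.strip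

-- functional form of A's dedup loop (result list only)
def pvDD (seen : PySem.Set String) : List String → List String
  | [] => []
  | w :: ws =>
    if !(PySem.Set.contains seen w) && decide (10 < PySem.Str.len w) then
      w :: pvDD (PySem.Set.add seen w) ws
    else pvDD seen ws

theorem pv_foldl_collect (l : List String) (acc : List String) :
    l.foldl (fun acc sentence =>
      if pvMatches sentence then acc ++ [PySem.Str.strip sentence] else acc) acc
    = acc ++ pvMapped l := by
  induction l generalizing acc with
  | nil => simp [pvMapped]
  | cons s rest ih =>
    by_cases h : pvMatches s = true
    · rw [List.foldl_cons, if_pos h, ih]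
      simp [pvMapped, h]
    · rw [List.foldl_cons, if_neg h, ih]
      simp [pvMapped, h]

theorem pv_foldl_dedup (ws : List String) (seen : PySem.Set String) (res : List String) :
    (ws.foldl (fun (st : PySem.Set String × List String) w =>
      if !(PySem.Set.contains st.1 w) && decide (10 < PySem.Str.len w) then
        (PySem.Set.add st.1 w, st.2 ++ [w])
      else st) (seen, res)).2 = res ++ pvDD seen ws := by
  induction ws generalizing seen res with
  | nil => simp [pvDD]
  | cons w ws ih =>
    rw [List.foldl_cons]
    by_cases hc : (!(PySem.Set.contains seen w) && decide (10 < PySem.Str.len w)) = true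
    · rw [if_pos hc, ih]
      simp only [pvDD]
      rw [if_pos hc]
      simp
    · rw [if_neg hc, ih]
      simp only [pvDD]
      rw [if_neg hc]

-- membership in one keyword's inner scan
theorem pv_mem_inner (k : String) (l : List (Int × String)) (acc : PySem.Set Int) (j : Int) :
    j ∈ l.foldl (fun acc p => if PySem.Str.isIn k p.2 then PySem.Set.add acc p.1 else acc) acc ↔
    j ∈ acc ∨ ∃ p ∈ l, p.1 = j ∧ PySem.Str.isIn k p.2 = true := by
  induction l generalizing acc with
  | nil => simp
  | cons p rest ih =>
    rw [List.foldl_cons]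
    by_cases hk : PySem.Str.isIn k p.2 = true
    · rw [if_pos hk, ih]
      simp only [PySem.Set.mem_add, List.mem_cons]
      constructor
      · rintro ((hj | rfl) | ⟨q, hq, hqj, hqin⟩)
        · exact Or.inl hj
        · exact Or.inr ⟨p, Or.inl rfl, rfl, hk⟩
        · exact Or.inr ⟨q, Or.inr hq, hqj, hqin⟩
      · rintro (hj | ⟨q, hq | hq, hqj, hqin⟩)
        · exact Or.inl (Or.inl hj)
        · subst hq; exact Or.inl (Or.inr hqj.symm)
        · exact Or.inr ⟨q, hq, hqj, hqin⟩
    · rw [if_neg hk, ih]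
      constructor
      · rintro (hj | ⟨q, hq, hqj, hqin⟩)
        · exact Or.inl hj
        · exact Or.inr ⟨q, List.mem_cons_of_mem _ hq, hqj, hqin⟩
      · rintro (hj | ⟨q, hq, hqj, hqin⟩)
        · exact Or.inl hj
        · rcases List.mem_cons.1 hq with rfl | hq'
          · exact absurd hqin hk
          · exact Or.inr ⟨q, hq', hqj, hqin⟩

-- membership in the whole hit set
theorem pv_mem_hit_aux (kws : List String) (l : List (Int × String)) (acc : PySem.Set Int) (j : Int) :
    j ∈ kws.foldl
      (fun acc k =>
        l.foldl (fun acc p => if PySem.Str.isIn k p.2 then PySem.Set.add acc p.1 else acc) acc)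
      acc ↔
    j ∈ acc ∨ ∃ k ∈ kws, ∃ p ∈ l, p.1 = j ∧ PySem.Str.isIn k p.2 = true := by
  induction kws generalizing acc with
  | nil => simp
  | cons k kws ih =>
    rw [List.foldl_cons, ih, pv_mem_inner]
    constructor
    · rintro ((hj | hin) | ⟨k', hk', hin⟩)
      · exact Or.inl hj
      · exact Or.inr ⟨k, List.mem_cons_self .., hin⟩
      · exact Or.inr ⟨k', List.mem_cons_of_mem _ hk', hin⟩
    · rintro (hj | ⟨k', hk', hin⟩)
      · exact Or.inl (Or.inl hj)
      · rcases List.mem_cons.1 hk' with rfl | hk''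
        · exact Or.inl (Or.inr hin)
        · exact Or.inr ⟨k', hk'', hin⟩

theorem pv_contains_hit (sentences : List String) (i : Nat) (hi : i < sentences.length) :
    PySem.Set.contains (pvHit (sentences.map PySem.Str.lower)) (i : Int)
      = pvMatches sentences[i] := by
  have hmem : (i : Int) ∈ pvHit (sentences.map PySem.Str.lower) ↔ pvMatches sentences[i] = true := by
    unfold pvHit
    rw [pv_mem_hit_aux]
    simp only [PySem.Set.empty, List.not_mem_nil, false_or]
    constructor
    · rintro ⟨k, hk, p, hp, hpj, hin⟩
      obtain ⟨m, hm, rfl⟩ := (PySem.List.mem_enumerate_iff _ _ _).1 hp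
      simp only [List.getElem_map] at hin
      have hmi : m = i := by simp at hpj; omega
      subst hmi
      exact List.any_eq_true.2 ⟨k, hk, hin⟩
    · intro h
      rcases List.any_eq_true.1 h with ⟨k, hk, hin⟩
      refine ⟨k, hk, ((i : Int), PySem.Str.lower sentences[i]), ?_, by simp, hin⟩
      rw [PySem.List.mem_enumerate_iff]
      exact ⟨i, by simpa using hi, by simp⟩
  rw [← PySem.Set.contains_iff] at hmem
  cases h : pvMatches sentences[i] with
  | true => exact hmem.2 h
  | false =>
    cases hc : PySem.Set.contains (pvHit (sentences.map PySem.Str.lower)) (i : Int) with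
    | false => rfl
    | true => exact absurd (hmem.1 hc) (by simp [h])

-- B's index pass equals A's dedup applied to the matched stripped sentences, truncated
theorem pv_go_eq (hit : PySem.Set Int) (l : List (Int × String))
    (hH : ∀ p ∈ l, PySem.Set.contains hit p.1 = pvMatches p.2)
    (seen : PySem.Set String) (res : List String) (h : res.length < 5) :
    pvGo hit seen res l = res ++ (pvDD seen (pvMapped (l.map (·.2)))).take (5 - res.length) := by
  induction l generalizing seen res with
  | nil => simp [pvGo, pvMapped, pvDD]
  | cons p rest ih =>
    obtain ⟨i, s⟩ := p
    have hps : PySem.Set.contains hit i = pvMatches s := hH (i, s) (by simp)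
    have hH' : ∀ p ∈ rest, PySem.Set.contains hit p.1 = pvMatches p.2 :=
      fun q hq => hH q (by simp [hq])
    by_cases hm : pvMatches s = true
    · have hmap : pvMapped (((i, s) :: rest).map (·.2)) = PySem.Str.strip s :: pvMapped (rest.map (·.2)) := by
        simp [pvMapped, hm]
      by_cases hc : (!(PySem.Set.contains seen (PySem.Str.strip s))
          && decide (10 < PySem.Str.len (PySem.Str.strip s))) = true
      · have hc' : (decide (10 < PySem.Str.len (PySem.Str.strip s))
            && !(PySem.Set.contains seen (PySem.Str.strip s))) = true := by
          rw [Bool.and_comm]; exact hc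
        have hDD : pvDD seen (pvMapped (((i, s) :: rest).map (·.2)))
            = PySem.Str.strip s :: pvDD (PySem.Set.add seen (PySem.Str.strip s)) (pvMapped (rest.map (·.2))) := by
          rw [hmap]; simp only [pvDD]; rw [if_pos hc]
        by_cases h5 : ((res ++ [PySem.Str.strip s]).length == 5) = true
        · simp only [pvGo, hps, hm, hc', h5]
          rw [hDD]
          have h4 : res.length = 4 := by simpa using h5
          have : 5 - res.length = 1 := by omega
          simp [this]
        · have hlt : (res ++ [PySem.Str.strip s]).length < 5 := by
            simp at h5 ⊢; omega
          simp only [pvGo, hps, hm, hc', h5]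
          rw [ih hH' _ _ hlt, hDD]
          have h51 : 5 - res.length = (5 - (res ++ [PySem.Str.strip s]).length) + 1 := by
            simp; omega
          rw [h51, List.take_succ_cons]
          simp
      · have hc' : (decide (10 < PySem.Str.len (PySem.Str.strip s))
            && !(PySem.Set.contains seen (PySem.Str.strip s))) = false := by
          rw [Bool.and_comm]; simpa using hc
        simp only [pvGo, hps, hm, hc', Bool.false_eq_true, if_neg (fun hx => hx)]
        rw [ih hH' _ _ h, hmap]
        simp only [pvDD]
        rw [if_neg hc]
        simp
    · have hmap : pvMapped (((i, s) :: rest).map (·.2)) = pvMapped (rest.map (·.2)) := by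
        simp [pvMapped, hm]
      have hm' : pvMatches s = false := by simpa using hm
      simp only [pvGo, hps, hm', Bool.false_eq_true, if_neg (fun hx => hx)]
      rw [ih hH' _ _ h, hmap]

-- ===== VERDICT (by name: the statement is the Claim_ definition above) =====
theorem extract_safety_warnings_spec : Claim_equal_extract_safety_warnings := by
  intro content _
  unfold Spec_extract_safety_warnings
  simp only [extract_safety_warnings, extract_safety_warnings_alt]
  rw [pv_foldl_collect, List.nil_append, pv_foldl_dedup, List.nil_append,
    PySem.List.slice_to _ (by norm_num)]
  rw [pv_go_eq _ _ ?_ _ _ (by simp)]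
  · rw [List.nil_append, PySem.List.map_snd_enumerate]
    simp
  · intro p hp
    obtain ⟨m, hm, rfl⟩ := (PySem.List.mem_enumerate_iff _ _ _).1 hp
    simpa using pv_contains_hit _ m hm
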